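-- pv_equiv track=rewrite | github.com/syarasyoujyu/Deep_Past_Challenge | refine/dict/train_translation_dict.py | find_phrase_positions
-- ===== SOURCE A (Python) =====
-- def find_phrase_positions(tokens: list[str], query_tokens: list[str]) -> list[int]:
--     if not query_tokens or len(query_tokens) > len(tokens):
--         return []
--
--     positions: list[int] = []
--     last_start = len(tokens) - len(query_tokens) + 1
--     for start in range(last_start):
--         if tokens[start : start + len(query_tokens)] == query_tokens:
--             positions.append(start)
--     return positions
-- ===== SOURCE B (Python) =====
-- def find_phrase_positions(tokens: list[str], query_tokens: list[str]) -> list[int]: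
--     if not query_tokens:
--         return []
--     m = len(query_tokens)
--     # KMP failure function: fail[i] = length of longest proper border of query_tokens[:i+1]
--     fail = [0] * m
--     k = 0
--     for i in range(1, m):
--         while k > 0 and query_tokens[i] != query_tokens[k]:
--             k = fail[k - 1]
--         if query_tokens[i] == query_tokens[k]:
--             k += 1
--         fail[i] = k
--     positions: list[int] = []
--     q = 0
--     for i, tok in enumerate(tokens):
--         while q > 0 and tok != query_tokens[q]:
--             q = fail[q - 1]
--         if tok == query_tokens[q]:
--             q += 1
--         if q == m:
--             positions.append(i - m + 1)
--             q = fail[m - 1]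
--     return positions
-- ===== Notes on version B (the rewrite author's own statement) =====
-- stated objective: alternative
-- what changed: B replaces A's slice comparison at every window start with the Knuth-Morris-Pratt algorithm: it precomputes the failure (border) table of the query and scans the tokens once, carrying the length of the longest query prefix matching a suffix of the scanned text.
import Mathlib
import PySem

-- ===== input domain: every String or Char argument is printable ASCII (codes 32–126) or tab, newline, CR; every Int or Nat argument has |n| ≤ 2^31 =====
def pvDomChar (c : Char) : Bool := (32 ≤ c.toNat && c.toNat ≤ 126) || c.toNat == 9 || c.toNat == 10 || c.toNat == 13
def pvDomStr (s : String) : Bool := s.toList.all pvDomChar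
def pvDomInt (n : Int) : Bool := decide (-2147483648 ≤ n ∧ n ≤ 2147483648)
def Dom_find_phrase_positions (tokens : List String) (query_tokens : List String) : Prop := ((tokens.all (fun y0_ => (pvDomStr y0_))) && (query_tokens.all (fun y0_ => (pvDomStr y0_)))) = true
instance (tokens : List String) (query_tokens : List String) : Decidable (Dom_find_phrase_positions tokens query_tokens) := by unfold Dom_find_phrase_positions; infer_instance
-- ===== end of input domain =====

-- B replaces A's slice comparison at every window start with the Knuth–Morris–Pratt
-- algorithm (failure table + single left-to-right scan); objective: alternative algorithm.

-- ===== PORT A =====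
def find_phrase_positions (tokens : List String) (query_tokens : List String) : List Int :=
  if query_tokens.isEmpty ∨ query_tokens.length > tokens.length then []
  else
    let last_start : Int := (tokens.length : Int) - (query_tokens.length : Int) + 1
    (PySem.List.pyRange 0 last_start 1).foldl
      (fun positions start =>
        if PySem.List.slice tokens (some start) (some (start + (query_tokens.length : Int))) == query_tokens
        then positions ++ [start] else positions) []

-- ===== PORT B =====
-- the inner `while q > 0 and tok != query_tokens[q]: q = fail[q-1]` loop; each pass
-- strictly decreases q, so fuel = the starting q always suffices (proved below)
def kmpSlide (query : List String) (fail : List Nat) (c : String) : Nat → Nat → Nat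
  | 0, q => q
  | fuel+1, q =>
    if 0 < q ∧ ¬ c = query.getD q "" then kmpSlide query fail c fuel (fail.getD (q-1) 0)
    else q

-- one iteration of the failure-table loop: state = (table so far, current border length k)
def kmpFailStep (query : List String) (st : List Nat × Nat) (i : Nat) : List Nat × Nat :=
  let k1 := kmpSlide query st.1 (query.getD i "") st.2 st.2
  let k2 := if query.getD i "" = query.getD k1 "" then k1 + 1 else k1
  (st.1 ++ [k2], k2)

def kmpFail (query : List String) : List Nat :=
  ((List.range' 1 (query.length - 1)).foldl (kmpFailStep query) ([0], 0)).1

-- one iteration of the scan loop: state = (positions found, current partial-match length q)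
def kmpScanStep (query : List String) (fail : List Nat) (m : Nat)
    (st : List Int × Nat) (p : Int × String) : List Int × Nat :=
  let q1 := kmpSlide query fail p.2 st.2 st.2
  let q2 := if p.2 = query.getD q1 "" then q1 + 1 else q1
  if q2 = m then (st.1 ++ [p.1 - (m : Int) + 1], fail.getD (m-1) 0) else (st.1, q2)

def find_phrase_positions_alt (tokens : List String) (query_tokens : List String) : List Int :=
  if query_tokens.isEmpty then []
  else
    let m := query_tokens.length
    let fail := kmpFail query_tokens
    ((PySem.List.enumerate tokens).foldl (kmpScanStep query_tokens fail m) ([], 0)).1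

-- ===== PRECONDITION & SPEC =====
def Spec_find_phrase_positions (tokens : List String) (query_tokens : List String) (out : List Int) : Prop := out = find_phrase_positions_alt tokens query_tokens
instance (tokens : List String) (query_tokens : List String) (out : List Int) : Decidable (Spec_find_phrase_positions tokens query_tokens out) := by unfold Spec_find_phrase_positions; infer_instance

-- ===== CLAIM (what is proved, stated in full; the proofs are below) =====
def Claim_equal_find_phrase_positions : Prop := ∀ (tokens : List String) (query_tokens : List String), Dom_find_phrase_positions tokens query_tokens → Spec_find_phrase_positions tokens query_tokens (find_phrase_positions tokens query_tokens)

-- ===== LEMMAS AND PROOFS =====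

-- Nat-level window test used to normalise port A: does the query match at start j?
def pvQ (tokens query_tokens : List String) (j : Nat) : Bool :=
  ((tokens.drop j).take query_tokens.length == query_tokens)

-- longest k ≤ b such that query.take k is a suffix of t (the KMP "state" at text t)
def pvMB (query : List String) (b : Nat) (t : List String) : Nat :=
  Nat.findGreatest (fun k => query.take k <:+ t) b

-- ---- port A normal form ----
theorem pvA_norm (tokens : List String) (first : String) (rest : List String) :
    find_phrase_positions tokens (first :: rest) =
      if tokens.length < (first :: rest).length then []
      else ((List.range (tokens.length - (first :: rest).length + 1)).filter
              (pvQ tokens (first :: rest))).map (fun j : Nat => (j : Int)) := by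
  simp only [find_phrase_positions]
  by_cases h : tokens.length < (first :: rest).length
  · rw [if_pos (Or.inr h), if_pos h]
  · have hguard : ¬((first :: rest).isEmpty = true ∨ (first :: rest).length > tokens.length) := by
      rintro (hc | hc)
      · simp at hc
      · exact h hc
    rw [if_neg hguard, if_neg h]
    rw [show ((tokens.length : Int) - ((first :: rest).length : Int) + 1)
          = ((tokens.length - (first :: rest).length + 1 : Nat) : Int) from by omega]
    rw [PySem.List.foldl_append_if_eq_filter, PySem.List.pyRange_one]
    simp only [List.nil_append, sub_zero, Int.toNat_natCast, zero_add, List.filter_map,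
      Function.comp_def, PySem.List.slice_natCast_add]
    rfl

-- ---- generic facts about suffixes and pvMB ----

-- of two suffixes of the same list, the shorter is a suffix of the longer
theorem pvSuffix_suffix {α : Type} {u v t : List α} (hu : u <:+ t) (hv : v <:+ t)
    (h : u.length ≤ v.length) : u <:+ v := by
  rw [← List.reverse_prefix] at hu hv ⊢
  exact List.prefix_of_prefix_length_le hu hv (by simpa)

theorem pvMB_le (query : List String) (b : Nat) (t : List String) : pvMB query b t ≤ b :=
  Nat.findGreatest_le b

theorem pvMB_suffix (query : List String) (b : Nat) (t : List String) :
    query.take (pvMB query b t) <:+ t := by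
  have h : query.take 0 <:+ t := by simp [List.nil_suffix]
  exact Nat.findGreatest_spec (P := fun k => query.take k <:+ t) (Nat.zero_le b) h

theorem pvMB_ge (query : List String) (b : Nat) (t : List String) {k : Nat}
    (hk : k ≤ b) (h : query.take k <:+ t) : k ≤ pvMB query b t :=
  Nat.le_findGreatest hk h

theorem pvMB_max (query : List String) (b : Nat) (t : List String) {k : Nat}
    (h1 : pvMB query b t < k) (h2 : k ≤ b) : ¬ query.take k <:+ t :=
  Nat.findGreatest_is_greatest h1 h2

-- query.take (k+1) is a suffix of t ++ [c] iff query.take k is a suffix of t and query[k] = c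
theorem pvSuf_succ (query t : List String) (k : Nat) (hk : k < query.length) (c : String) :
    (query.take (k+1) <:+ t ++ [c] ↔ (query.take k <:+ t ∧ query.getD k "" = c)) := by
  rw [← List.take_append_getElem hk, List.getD_eq_getElem query "" hk]
  constructor
  · rintro ⟨w, hw⟩
    rw [← List.append_assoc] at hw
    rcases List.append_inj' hw (by simp) with ⟨h1, h2⟩
    exact ⟨⟨w, h1⟩, by simpa using h2⟩
  · rintro ⟨⟨w, hw⟩, hc⟩
    exact ⟨w, by rw [← List.append_assoc, hw, hc]⟩

-- value of pvMB after appending a character, positive case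
theorem pvMB_concat_pos (query t : List String) (b q : Nat) (c : String)
    (hb : b + 1 ≤ query.length) (hq : q ≤ b)
    (hsuf : query.take q <:+ t) (hc : query.getD q "" = c)
    (hmax : ∀ j, q < j → j ≤ b → query.take j <:+ t → ¬ query.getD j "" = c) :
    pvMB query (b+1) (t ++ [c]) = q + 1 := by
  have hP : query.take (q+1) <:+ t ++ [c] :=
    (pvSuf_succ query t q (by omega) c).mpr ⟨hsuf, hc⟩
  have hle : q + 1 ≤ pvMB query (b+1) (t ++ [c]) :=
    pvMB_ge query (b+1) (t ++ [c]) (by omega) hP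
  by_contra hne
  have hlt : q + 1 < pvMB query (b+1) (t ++ [c]) := by omega
  set r := pvMB query (b+1) (t ++ [c]) with hr
  have hrle : r ≤ b + 1 := pvMB_le query (b+1) (t ++ [c])
  have hPr : query.take r <:+ t ++ [c] := pvMB_suffix query (b+1) (t ++ [c])
  have hr1 : r = (r-1) + 1 := by omega
  rw [hr1] at hPr
  rcases (pvSuf_succ query t (r-1) (by omega) c).mp hPr with ⟨hs, hcc⟩
  exact hmax (r-1) (by omega) (by omega) hs hcc

-- value of pvMB after appending a character, no-match case
theorem pvMB_concat_zero (query t : List String) (b : Nat) (c : String)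
    (hb : b + 1 ≤ query.length)
    (hnone : ∀ j, j ≤ b → query.take j <:+ t → ¬ query.getD j "" = c) :
    pvMB query (b+1) (t ++ [c]) = 0 := by
  by_contra hne
  set r := pvMB query (b+1) (t ++ [c]) with hr
  have hrpos : 0 < r := Nat.pos_of_ne_zero hne
  have hrle : r ≤ b + 1 := pvMB_le query (b+1) (t ++ [c])
  have hPr : query.take r <:+ t ++ [c] := pvMB_suffix query (b+1) (t ++ [c])
  have hr1 : r = (r-1) + 1 := by omega
  rw [hr1] at hPr
  rcases (pvSuf_succ query t (r-1) (by omega) c).mp hPr with ⟨hs, hcc⟩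
  exact hnone (r-1) (by omega) hs hcc

-- ---- the slide-and-increment step computes pvMB of the extended text ----
theorem pvSlide_inc (query : List String) (fail : List Nat) (b : Nat) (c : String)
    (hb : b + 1 ≤ query.length)
    (hfail : ∀ j, j < b → fail.getD j 0 = pvMB query j (query.take (j+1))) :
    ∀ fuel q (t : List String), q ≤ fuel → q ≤ b → query.take q <:+ t →
      (∀ j, q < j → j ≤ b → query.take j <:+ t → ¬ query.getD j "" = c) →
      (if c = query.getD (kmpSlide query fail c fuel q) "" then kmpSlide query fail c fuel q + 1
       else kmpSlide query fail c fuel q) = pvMB query (b+1) (t ++ [c]) := by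
  intro fuel
  induction fuel with
  | zero =>
    intro q t hfuel hqb hsuf hmax
    have hq0 : q = 0 := by omega
    subst hq0
    simp only [kmpSlide]
    by_cases hc : c = query.getD 0 ""
    · rw [if_pos hc]
      exact (pvMB_concat_pos query t b 0 c hb (by omega) (by simp) hc.symm hmax).symm
    · rw [if_neg hc]
      refine (pvMB_concat_zero query t b c hb ?_).symm
      intro j hj hs hcc
      rcases Nat.eq_zero_or_pos j with hj0 | hjpos
      · subst hj0; exact hc hcc.symm
      · exact hmax j hjpos hj hs hcc
  | succ fuel ih =>
    intro q t hfuel hqb hsuf hmax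
    by_cases hcond : 0 < q ∧ ¬ c = query.getD q ""
    · rw [show kmpSlide query fail c (fuel+1) q = kmpSlide query fail c fuel (fail.getD (q-1) 0)
          from by rw [kmpSlide]; rw [if_pos hcond]]
      have hq1b : q - 1 < b ∨ (q - 1 < b ∨ q - 1 = b) := by omega
      have hfq : fail.getD (q-1) 0 = pvMB query (q-1) (query.take q) := by
        have := hfail (q-1) (by omega)
        rwa [show q - 1 + 1 = q from by omega] at this
      set q' := fail.getD (q-1) 0 with hq'
      have hq'le : q' ≤ q - 1 := by rw [hfq]; exact pvMB_le _ _ _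
      have hsuf' : query.take q' <:+ t := by
        have h1 : query.take q' <:+ query.take q := by
          rw [hfq]; exact pvMB_suffix query (q-1) (query.take q)
        exact h1.trans hsuf
      refine ih q' t (by omega) (by omega) hsuf' ?_
      intro j hj1 hj2 hs hcc
      rcases Nat.lt_trichotomy j q with hlt | heq | hgt
      · -- q' < j < q : j would be a longer border of query.take q than q' = pvMB (q-1)
        have hjq : query.take j <:+ query.take q := by
          apply pvSuffix_suffix hs hsuf
          simp only [List.length_take]
          omega
        have : j ≤ q' := by
          rw [hfq]; exact pvMB_ge query (q-1) (query.take q) (by omega) hjq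
        omega
      · subst heq; exact hcond.2 hcc.symm
      · exact hmax j hgt hj2 hs hcc
    · have hstop : kmpSlide query fail c (fuel+1) q = q := by
        rw [kmpSlide]; rw [if_neg hcond]
      rw [hstop]
      by_cases hc : c = query.getD q ""
      · rw [if_pos hc]
        exact (pvMB_concat_pos query t b q c hb hqb hsuf hc.symm hmax).symm
      · rw [if_neg hc]
        have hq0 : q = 0 := by
          by_contra h0
          exact hcond ⟨Nat.pos_of_ne_zero h0, hc⟩
        subst hq0
        refine (pvMB_concat_zero query t b c hb ?_).symm
        intro j hj hs hcc
        rcases Nat.eq_zero_or_pos j with hj0 | hjpos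
        · subst hj0; exact hc hcc.symm
        · exact hmax j hjpos hj hs hcc

-- ---- correctness of the failure table ----
theorem pvFail_fold (query : List String) (hm : 0 < query.length) :
    ∀ d, d ≤ query.length - 1 →
      (((List.range' 1 d).foldl (kmpFailStep query) ([0], 0)).1.length = d + 1) ∧
      (∀ j, j ≤ d → ((List.range' 1 d).foldl (kmpFailStep query) ([0], 0)).1.getD j 0
          = pvMB query j (query.take (j+1))) ∧
      (((List.range' 1 d).foldl (kmpFailStep query) ([0], 0)).2
          = pvMB query d (query.take (d+1))) := by
  intro d
  induction d with
  | zero =>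
    intro _
    refine ⟨by simp, ?_, ?_⟩
    · intro j hj
      have hj0 : j = 0 := by omega
      subst hj0
      simp [pvMB]
    · simp [pvMB]
  | succ d ihd =>
    intro hd
    have hd' : d ≤ query.length - 1 := by omega
    obtain ⟨ihlen, ihget, ihk⟩ := ihd hd'
    have hrange : List.range' 1 (d+1) = List.range' 1 d ++ [d + 1] := by
      rw [List.range'_concat]; simp [Nat.add_comm]
    rw [hrange, List.foldl_append, List.foldl_cons, List.foldl_nil]
    set st := ((List.range' 1 d).foldl (kmpFailStep query) ([0], 0)) with hst
    have h1d : d + 1 < query.length := by omega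
    set c := query.getD (d + 1) "" with hc
    have hb : d + 1 ≤ query.length := by omega
    have hfailh : ∀ j, j < d → st.1.getD j 0 = pvMB query j (query.take (j+1)) := by
      intro j hj; exact ihget j (by omega)
    have hqle : st.2 ≤ d := by rw [ihk]; exact pvMB_le _ _ _
    have hslide := pvSlide_inc query st.1 d c hb hfailh st.2 st.2 (query.take (d+1))
      (le_refl _) hqle
      (by rw [ihk]; exact pvMB_suffix query d (query.take (d+1)))
      (by
        intro j hj1 hj2 hs hcc
        exact pvMB_max query d (query.take (d+1)) (by rw [← ihk]; omega) hj2 hs)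
    have hext : query.take (d+1) ++ [c] = query.take (d+1+1) := by
      rw [hc, List.getD_eq_getElem query "" h1d]
      exact List.take_append_getElem h1d
    rw [hext] at hslide
    simp only [kmpFailStep, ← hc]
    rw [hslide]
    refine ⟨by simp [ihlen], ?_, rfl⟩
    intro j hj
    rcases Nat.lt_or_ge j (d+1) with hlt | hge
    · have hjlen : j < st.1.length := by omega
      rw [List.getD_append _ _ _ _ hjlen]
      exact ihget j (by omega)
    · have hj' : j = d + 1 := by omega
      subst hj'
      have hl : st.1.length = d + 1 := ihlen
      rw [List.getD_eq_getElem _ _ (by simp [hl] : d + 1 < (st.1 ++ [pvMB query (d+1) (query.take (d+1+1))]).length)]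
      rw [List.getElem_append_right (by omega)]
      simp [hl]

theorem pvFail_spec (query : List String) (hm : 0 < query.length) :
    ∀ j, j < query.length → (kmpFail query).getD j 0 = pvMB query j (query.take (j+1)) := by
  intro j hj
  have := (pvFail_fold query hm (query.length - 1) (le_refl _)).2.1 j (by omega)
  simpa [kmpFail] using this

-- pvMB at the full bound equals m exactly on a full match
theorem pvMB_full_iff (query t : List String) :
    pvMB query query.length t = query.length ↔ query <:+ t := by
  constructor
  · intro h
    have := pvMB_suffix query query.length t
    rwa [h, List.take_length] at this
  · intro h
    have hle := pvMB_le query query.length t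
    have hge := pvMB_ge query query.length t (le_refl _) (by rwa [List.take_length])
    omega

-- after a full match the reset value fail[m-1] is again the correct state
theorem pvMB_reset (query t : List String) (hm : 0 < query.length) (h : query <:+ t) :
    pvMB query (query.length - 1) t
      = pvMB query (query.length - 1) (query.take ((query.length - 1) + 1)) := by
  have hq : query.take ((query.length - 1) + 1) = query := by
    rw [show query.length - 1 + 1 = query.length from by omega, List.take_length]
  rw [hq]
  apply Nat.le_antisymm
  · set r := pvMB query (query.length - 1) t with hr
    have h1 : query.take r <:+ t := pvMB_suffix _ _ _
    have h2 : r ≤ query.length - 1 := pvMB_le _ _ _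
    have h3 : query.take r <:+ query := by
      apply pvSuffix_suffix h1 h
      simp only [List.length_take]; omega
    exact pvMB_ge query (query.length - 1) query h2 h3
  · set s := pvMB query (query.length - 1) query with hs
    have h1 : query.take s <:+ query := pvMB_suffix _ _ _
    exact pvMB_ge query (query.length - 1) t (pvMB_le _ _ _) (h1.trans h)

-- ---- the scan loop invariant ----
theorem pvScan_fold (tokens query : List String) (hm : 0 < query.length) :
    ∀ i, i ≤ tokens.length →
      ((PySem.List.enumerate tokens).take i).foldl
          (kmpScanStep query (kmpFail query) query.length) ([], 0)
        = (((List.range (i + 1 - query.length)).filter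
              (fun j => decide (query <:+ tokens.take (j + query.length)))).map
              (fun j : Nat => (j : Int)),
           pvMB query (query.length - 1) (tokens.take i)) := by
  intro i
  induction i with
  | zero =>
    intro _
    have h1 : 0 + 1 - query.length = 0 := by omega
    rw [h1]
    have h2 : pvMB query (query.length - 1) (tokens.take 0) = 0 := by
      rw [List.take_zero]
      by_contra hne
      have hrpos : 0 < pvMB query (query.length - 1) ([] : List String) :=
        Nat.pos_of_ne_zero hne
      have hs := pvMB_suffix query (query.length - 1) ([] : List String)
      rw [List.suffix_nil] at hs
      rcases List.take_eq_nil_iff.mp hs with h0 | h0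
      · omega
      · rw [h0] at hm
        simp at hm
    rw [h2]
    simp
  | succ i ihi =>
    intro hi
    have hi' : i ≤ tokens.length := by omega
    have hilt : i < tokens.length := by omega
    have hilt' : i < (PySem.List.enumerate tokens).length := by
      rwa [PySem.List.length_enumerate]
    have htake : (PySem.List.enumerate tokens).take (i+1)
        = (PySem.List.enumerate tokens).take i ++ [((i : Int), tokens[i])] := by
      rw [← List.take_append_getElem hilt']
      congr 1
      rw [PySem.List.getElem_enumerate]
      simp
    rw [htake, List.foldl_append, List.foldl_cons, List.foldl_nil, ihi hi']
    -- apply the step lemma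
    set c := tokens[i] with hcdef
    set q := pvMB query (query.length - 1) (tokens.take i) with hqdef
    have hb : (query.length - 1) + 1 ≤ query.length := by omega
    have hfailh : ∀ j, j < query.length - 1 →
        (kmpFail query).getD j 0 = pvMB query j (query.take (j+1)) := by
      intro j hj; exact pvFail_spec query hm j (by omega)
    have hslide := pvSlide_inc query (kmpFail query) (query.length - 1) c hb hfailh
      q q (tokens.take i) (le_refl _) (pvMB_le _ _ _) (pvMB_suffix _ _ _)
      (by
        intro j hj1 hj2 hs hcc
        exact pvMB_max query (query.length - 1) (tokens.take i) hj1 hj2 hs)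
    have hext : tokens.take i ++ [c] = tokens.take (i+1) := by
      rw [hcdef]; exact List.take_append_getElem hilt
    rw [hext, show query.length - 1 + 1 = query.length from by omega] at hslide
    simp only [kmpScanStep]
    rw [hslide]
    set q2 := pvMB query query.length (tokens.take (i+1)) with hq2
    by_cases hfull : q2 = query.length
    · rw [if_pos hfull]
      have hmatch : query <:+ tokens.take (i+1) := (pvMB_full_iff query _).mp hfull
      have hlen : query.length ≤ i + 1 := by
        have := hmatch.length_le
        simp only [List.length_take] at this
        omega
      rw [Prod.mk.injEq]
      constructor
      · -- emitted positions
        have hr : i + 1 + 1 - query.length = (i + 1 - query.length) + 1 := by omega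
        rw [hr, List.range_succ, List.filter_append, List.map_append]
        have hkeep : List.filter
            (fun j => decide (query <:+ tokens.take (j + query.length)))
            [i + 1 - query.length]
            = [i + 1 - query.length] := by
          simp only [List.filter_cons, List.filter_nil]
          rw [show i + 1 - query.length + query.length = i + 1 from by omega]
          simp [hmatch]
        rw [hkeep]
        congr 1
        simp only [List.map_cons, List.map_nil]
        congr 1
        omega
      · -- reset state
        rw [pvMB_reset query (tokens.take (i+1)) hm hmatch]
        exact pvFail_spec query hm (query.length - 1) (by omega)
    · rw [if_neg hfull]
      have hnomatch : ¬ query <:+ tokens.take (i+1) := by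
        intro h
        exact hfull ((pvMB_full_iff query _).mpr h)
      rw [Prod.mk.injEq]
      constructor
      · rcases Nat.lt_or_ge (i+1) query.length with hlt | hge
        · have e1 : i + 1 + 1 - query.length = 0 := by omega
          have e2 : i + 1 - query.length = 0 := by omega
          rw [e1, e2]
        · have hr : i + 1 + 1 - query.length = (i + 1 - query.length) + 1 := by omega
          rw [hr, List.range_succ, List.filter_append, List.map_append]
          have hdrop : List.filter
              (fun j => decide (query <:+ tokens.take (j + query.length)))
              [i + 1 - query.length] = [] := by
            simp only [List.filter_cons, List.filter_nil]
            rw [show i + 1 - query.length + query.length = i + 1 from by omega]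
            simp [hnomatch]
          rw [hdrop]
          simp
      · -- state q2 < m, drop the top bound by one
        have hPm : ¬ query.take query.length <:+ tokens.take (i+1) := by
          rwa [List.take_length]
        have e : query.length = (query.length - 1) + 1 := by omega
        have hq2' : pvMB query query.length (tokens.take (i+1))
            = pvMB query (query.length - 1) (tokens.take (i+1)) := by
          unfold pvMB
          conv_lhs => rw [e]
          rw [Nat.findGreatest_succ, if_neg (by
            rw [show query.length - 1 + 1 = query.length from by omega]
            exact hPm)]
        rw [← hq2']

-- suffix-at-a-window ↔ slice test of port A's normal form
theorem pvMatch_iff (tokens query : List String) (j : Nat)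
    (hj : j + query.length ≤ tokens.length) :
    (query <:+ tokens.take (j + query.length)) ↔ (tokens.drop j).take query.length = query := by
  rw [List.suffix_iff_eq_drop]
  have hlen : (tokens.take (j + query.length)).length = j + query.length := by
    simp only [List.length_take]; omega
  rw [hlen, show j + query.length - query.length = j from by omega, List.drop_take]
  rw [show j + query.length - j = query.length from by omega]
  exact ⟨fun h => h.symm, fun h => h.symm⟩

-- ===== VERDICT (by name: the statement is the Claim_ definition above) =====
theorem find_phrase_positions_spec : Claim_equal_find_phrase_positions := by
  intro tokens query_tokens _hdom
  unfold Spec_find_phrase_positions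
  cases query_tokens with
  | nil => simp [find_phrase_positions, find_phrase_positions_alt]
  | cons first rest =>
    have hm : 0 < (first :: rest).length := by simp
    have hBnorm : find_phrase_positions_alt tokens (first :: rest)
        = (((List.range (tokens.length + 1 - (first :: rest).length)).filter
              (fun j => decide ((first :: rest) <:+ tokens.take (j + (first :: rest).length)))).map
              (fun j : Nat => (j : Int))) := by
      have hfold := pvScan_fold tokens (first :: rest) hm tokens.length (le_refl _)
      rw [show (PySem.List.enumerate tokens).take tokens.length
            = PySem.List.enumerate tokens from by
          rw [← PySem.List.length_enumerate (xs := tokens) (s := 0), List.take_length]] at hfold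
      simp only [find_phrase_positions_alt, List.isEmpty_cons, Bool.false_eq_true, if_false]
      rw [hfold]
    rw [pvA_norm, hBnorm]
    by_cases hgt : tokens.length < (first :: rest).length
    · rw [if_pos hgt, show tokens.length + 1 - (first :: rest).length = 0 from by omega]
      simp
    · rw [if_neg hgt, show tokens.length + 1 - (first :: rest).length
            = tokens.length - (first :: rest).length + 1 from by omega]
      congr 1
      apply List.filter_congr
      intro j hj
      rw [List.mem_range] at hj
      have hjle : j + (first :: rest).length ≤ tokens.length := by omega
      rw [pvQ, Bool.eq_iff_iff]
      simp only [decide_eq_true_eq, beq_iff_eq]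
      exact (pvMatch_iff tokens (first :: rest) j hjle).symm
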